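-- pv_equiv track=rewrite | github.com/SeequentEvo/evo-data-converters | src/evo/data_converters/ubc/importer/utils.py | _handle_ubc_files_list
-- ===== SOURCE A (Python) =====
-- def _handle_ubc_files_list(files_path: list[str]) -> tuple[str, list[str]]:
--     ubc_mesh_file: str | None = None
--     ubc_numeric_values_files: list[str] = []
--     for f in files_path:
--         if f.endswith(".msh"):
--             if ubc_mesh_file:
--                 raise ValueError("Multiple UBC mesh files provided.")
--             ubc_mesh_file = f
--         else:  # assuming that all other files are numeric values files
--             ubc_numeric_values_files.append(f)
--
--     if not ubc_mesh_file:
--         raise ValueError("No UBC mesh file provided.")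
--
--     return ubc_mesh_file, ubc_numeric_values_files
-- ===== SOURCE B (Python) =====
-- def _scan(fs: list[str]) -> tuple[str | None, list[str]]:
--     # divide and conquer: (mesh or None, numeric files in order); raises on two meshes
--     if len(fs) == 1:
--         f = fs[0]
--         return (f, []) if f.endswith(".msh") else (None, [f])
--     if not fs:
--         return (None, [])
--     mid = len(fs) // 2
--     m1, n1 = _scan(fs[:mid])
--     m2, n2 = _scan(fs[mid:])
--     if m1 and m2:
--         raise ValueError("Multiple UBC mesh files provided.")
--     return (m1 if m1 else m2), n1 + n2
--
--
-- def _handle_ubc_files_list(files_path: list[str]) -> tuple[str, list[str]]: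
--     mesh, numeric = _scan(files_path)
--     if not mesh:
--         raise ValueError("No UBC mesh file provided.")
--     return mesh, numeric
-- ===== Notes on version B (the rewrite author's own statement) =====
-- stated objective: alternative
-- what changed: Replaces A's single early-raising accumulating loop by a divide-and-conquer recursion: the list is split in halves, each half is reduced to (optional mesh, numeric files), and the two results are merged, raising on a mesh conflict at merge time and on a missing mesh at the top.
import Mathlib
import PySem

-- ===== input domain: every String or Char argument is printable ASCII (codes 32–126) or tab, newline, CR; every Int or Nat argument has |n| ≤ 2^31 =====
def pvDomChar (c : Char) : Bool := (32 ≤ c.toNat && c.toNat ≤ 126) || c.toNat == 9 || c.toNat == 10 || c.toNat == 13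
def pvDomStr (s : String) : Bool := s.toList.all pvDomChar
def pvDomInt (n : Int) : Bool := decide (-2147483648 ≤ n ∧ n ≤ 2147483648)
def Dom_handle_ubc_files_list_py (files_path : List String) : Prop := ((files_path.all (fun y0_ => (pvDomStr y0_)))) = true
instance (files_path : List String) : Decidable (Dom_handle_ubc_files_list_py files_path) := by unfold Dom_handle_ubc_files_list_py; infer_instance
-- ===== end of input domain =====

-- B replaces A's single accumulating loop by a divide-and-conquer recursion (alternative structure, not faster); equivalence of return values is proved on Pre_ (exactly one ".msh" file), where A returns normally.

-- ===== PORT A =====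
-- Python truthiness of the `ubc_mesh_file : str | None` slot
def pvTruthy (m : Option String) : Bool :=
  match m with
  | none => false
  | some s => s ≠ ""

-- the for-loop of A; `none` = a ValueError was raised
def pvLoopA (files : List String) (mesh : Option String) (nums : List String) :
    Option (String × List String) :=
  match files with
  | [] =>
      match mesh with
      | none => none
      | some m => if m = "" then none else some (m, nums)
  | f :: rest =>
      if PySem.Str.endswith f ".msh" then
        if pvTruthy mesh then none
        else pvLoopA rest (some f) nums
      else
        pvLoopA rest mesh (nums ++ [f])

def handle_ubc_files_list_py (files_path : List String) : String × List String :=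
  (pvLoopA files_path none []).getD ("", [])

-- ===== PORT B =====
-- _scan of Source B; `none` = ValueError "Multiple UBC mesh files provided." was raised.
-- fs[:mid] / fs[mid:] with 0 ≤ mid ≤ len(fs) are exactly List.take mid / List.drop mid.
def pvScanB (fs : List String) : Option (Option String × List String) :=
  if fs.length = 1 then
    match fs with
    | f :: _ =>
        if PySem.Str.endswith f ".msh" then some (some f, []) else some (none, [f])
    | [] => none   -- unreachable: length = 1
  else if fs = [] then some (none, [])
  else
    let mid := fs.length / 2
    match pvScanB (fs.take mid) with
    | none => none
    | some (m1, n1) =>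
      match pvScanB (fs.drop mid) with
      | none => none
      | some (m2, n2) =>
        if pvTruthy m1 && pvTruthy m2 then none
        else some ((if pvTruthy m1 then m1 else m2), n1 ++ n2)
termination_by fs.length
decreasing_by
  all_goals
    have h0 : 0 < fs.length := List.length_pos_iff.mpr ‹¬ fs = []›
    have h1 : fs.length ≠ 1 := ‹¬ fs.length = 1›
    simp [List.length_take, List.length_drop]
    omega

def handle_ubc_files_list_py_alt (files_path : List String) : String × List String :=
  match pvScanB files_path with
  | some (some m, numeric) => if m = "" then ("", []) else (m, numeric)
  | _ => ("", [])   -- a ValueError was raised (excluded by Pre_)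

-- ===== PRECONDITION & SPEC =====
-- exactly the inputs on which A returns normally: exactly one file ending in ".msh"
def Pre_handle_ubc_files_list_py (files_path : List String) : Prop :=
  (files_path.filter (fun f => PySem.Str.endswith f ".msh")).length = 1
instance (files_path : List String) : Decidable (Pre_handle_ubc_files_list_py files_path) := by
  unfold Pre_handle_ubc_files_list_py; infer_instance

def pvWitness_handle_ubc_files_list_py : List String := ["a.txt", "m.msh", "b.dat"]

def Spec_handle_ubc_files_list_py (files_path : List String) (out : String × List String) : Prop := out = handle_ubc_files_list_py_alt files_path
instance (files_path : List String) (out : String × List String) : Decidable (Spec_handle_ubc_files_list_py files_path out) := by unfold Spec_handle_ubc_files_list_py; infer_instance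

-- ===== CLAIM (what is proved, stated in full; the proofs are below) =====
def Claim_equal_handle_ubc_files_list_py : Prop := ∀ (files_path : List String), Dom_handle_ubc_files_list_py files_path → Pre_handle_ubc_files_list_py files_path → Spec_handle_ubc_files_list_py files_path (handle_ubc_files_list_py files_path)

-- ===== LEMMAS AND PROOFS =====

lemma pv_msh_ne_empty (f : String) (h : PySem.Str.endswith f ".msh" = true) : f ≠ "" := by
  intro he; subst he; simp [PySem.Str.endswith] at h
  exact absurd h (by decide)

-- A's loop after a (nonempty) mesh file has been found
lemma pvLoopA_some (files : List String) (m : String) (hm : m ≠ "") :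
    ∀ nums, pvLoopA files (some m) nums =
      if (files.filter (fun f => PySem.Str.endswith f ".msh")).isEmpty then
        some (m, nums ++ files.filter (fun f => !PySem.Str.endswith f ".msh"))
      else none := by
  induction files with
  | nil => intro nums; simp [pvLoopA, hm]
  | cons f rest ih =>
      intro nums
      by_cases hf : PySem.Str.endswith f ".msh" = true
      · rw [pvLoopA, if_pos hf, if_pos (show pvTruthy (some m) = true by simp [pvTruthy, hm])]
        simp at hf
        simp [hf]
      · rw [pvLoopA, if_neg hf, ih]
        simp at hf
        simp [hf, List.append_assoc]

-- A's loop before any mesh file has been found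
lemma pvLoopA_none (files : List String) :
    ∀ nums, pvLoopA files none nums =
      match files.filter (fun f => PySem.Str.endswith f ".msh") with
      | [m] => some (m, nums ++ files.filter (fun f => !PySem.Str.endswith f ".msh"))
      | _ => none := by
  induction files with
  | nil => intro nums; simp [pvLoopA]
  | cons f rest ih =>
      intro nums
      by_cases hf : PySem.Str.endswith f ".msh" = true
      · have hne := pv_msh_ne_empty f hf
        rw [pvLoopA, if_pos hf, if_neg (show ¬ pvTruthy none = true by simp [pvTruthy]),
          pvLoopA_some rest f hne nums,
          List.filter_cons_of_pos (p := fun g => PySem.Str.endswith g ".msh") (a := f) (l := rest) hf,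
          List.filter_cons_of_neg (p := fun g => !PySem.Str.endswith g ".msh") (a := f) (l := rest)
            (by show ¬(!PySem.Str.endswith f ".msh") = true; rw [hf]; decide)]
        rcases hx : rest.filter (fun g => PySem.Str.endswith g ".msh") with _ | ⟨x, xs⟩ <;>
          simp
      · rw [pvLoopA, if_neg hf, ih,
          List.filter_cons_of_neg (p := fun g => PySem.Str.endswith g ".msh") (a := f) (l := rest) hf,
          List.filter_cons_of_pos (p := fun g => !PySem.Str.endswith g ".msh") (a := f) (l := rest)
            (by show (!PySem.Str.endswith f ".msh") = true; rw [eq_false_of_ne_true hf]; decide)]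
        rcases hx : rest.filter (fun g => PySem.Str.endswith g ".msh") with _ | ⟨x, xs⟩ <;>
          simp [List.append_assoc]

-- characterisation of B's divide-and-conquer pass
lemma pvScanB_spec (fs : List String) :
    pvScanB fs =
      if 2 ≤ (fs.filter (fun f => PySem.Str.endswith f ".msh")).length then none
      else some ((fs.filter (fun f => PySem.Str.endswith f ".msh")).head?,
                 fs.filter (fun f => !PySem.Str.endswith f ".msh")) := by
  induction fs using pvScanB.induct with
  | case1 f tail hend hlen =>
      have ht : tail = [] := by simpa using hlen
      subst ht
      simp at hend
      rw [pvScanB]; simp [hend]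
  | case2 f tail hend hlen =>
      have ht : tail = [] := by simpa using hlen
      subst ht
      simp at hend
      rw [pvScanB]; simp [hend]
  | case3 h => simp at h
  | case4 h => rw [pvScanB]; simp
  | case5 x h1 h2 mid hrec ih =>
      have hmid : x.length / 2 = mid := rfl
      have hc : 2 ≤ ((List.take mid x).filter (fun f => PySem.Str.endswith f ".msh")).length := by
        by_contra hc
        rw [ih, if_neg hc] at hrec
        exact absurd hrec (by simp)
      have hge : 2 ≤ (x.filter (fun f => PySem.Str.endswith f ".msh")).length := by
        calc 2 ≤ ((List.take mid x).filter (fun f => PySem.Str.endswith f ".msh")).length := hc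
          _ ≤ _ := by
            conv_rhs => rw [← List.take_append_drop mid x]
            rw [List.filter_append, List.length_append]
            omega
      rw [pvScanB.eq_def]
      simp only [if_neg h1, if_neg h2]
      rw [hmid, ih, if_pos hc, if_pos hge]
  | case6 x h1 h2 mid m1 n1 heq1 hrec2 ih1 ih2 =>
      have hmid : x.length / 2 = mid := rfl
      have hc2 : 2 ≤ ((List.drop mid x).filter (fun f => PySem.Str.endswith f ".msh")).length := by
        by_contra hc
        rw [ih2, if_neg hc] at hrec2
        exact absurd hrec2 (by simp)
      have hge : 2 ≤ (x.filter (fun f => PySem.Str.endswith f ".msh")).length := by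
        calc 2 ≤ ((List.drop mid x).filter (fun f => PySem.Str.endswith f ".msh")).length := hc2
          _ ≤ _ := by
            conv_rhs => rw [← List.take_append_drop mid x]
            rw [List.filter_append, List.length_append]
            omega
      rw [pvScanB.eq_def]
      simp only [if_neg h1, if_neg h2]
      rw [hmid, heq1, ih2, if_pos hc2, if_pos hge]
  | case7 x h1 h2 mid m1 n1 heq1 m2 n2 heq2 htr ih1 ih2 =>
      -- a mesh file in each half: ValueError on both sides
      have hmid : x.length / 2 = mid := rfl
      have hc1 : ¬ 2 ≤ ((List.take mid x).filter (fun f => PySem.Str.endswith f ".msh")).length := by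
        intro hc
        rw [ih1, if_pos hc] at heq1
        exact absurd heq1 (by simp)
      have hc2 : ¬ 2 ≤ ((List.drop mid x).filter (fun f => PySem.Str.endswith f ".msh")).length := by
        intro hc
        rw [ih2, if_pos hc] at heq2
        exact absurd heq2 (by simp)
      rw [ih1, if_neg hc1] at heq1
      rw [ih2, if_neg hc2] at heq2
      obtain ⟨hm1, hn1⟩ := Prod.mk.injEq .. ▸ (Option.some.injEq .. ▸ heq1)
      obtain ⟨hm2, hn2⟩ := Prod.mk.injEq .. ▸ (Option.some.injEq .. ▸ heq2)
      have htr1 : pvTruthy m1 = true := by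
        rcases Bool.and_eq_true .. |>.mp htr with ⟨a, _⟩; exact a
      have htr2 : pvTruthy m2 = true := by
        rcases Bool.and_eq_true .. |>.mp htr with ⟨_, b⟩; exact b
      have hne1 : (List.take mid x).filter (fun f => PySem.Str.endswith f ".msh") ≠ [] := by
        intro h; rw [← hm1, h] at htr1; simp [pvTruthy] at htr1
      have hne2 : (List.drop mid x).filter (fun f => PySem.Str.endswith f ".msh") ≠ [] := by
        intro h; rw [← hm2, h] at htr2; simp [pvTruthy] at htr2
      have hge : 2 ≤ (x.filter (fun f => PySem.Str.endswith f ".msh")).length := by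
        conv_rhs => rw [← List.take_append_drop mid x]
        rw [List.filter_append, List.length_append]
        have p1 := List.length_pos_iff.mpr hne1
        have p2 := List.length_pos_iff.mpr hne2
        omega
      rw [pvScanB.eq_def]
      simp only [if_neg h1, if_neg h2]
      rw [hmid, ih1, ih2, if_neg hc1, if_neg hc2]
      simp only [hm1, hm2]
      rw [if_pos htr, if_pos hge]
  | case8 x h1 h2 mid m1 n1 heq1 m2 n2 heq2 htr ih1 ih2 =>
      have hmid : x.length / 2 = mid := rfl
      have hc1 : ¬ 2 ≤ ((List.take mid x).filter (fun f => PySem.Str.endswith f ".msh")).length := by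
        intro hc
        rw [ih1, if_pos hc] at heq1
        exact absurd heq1 (by simp)
      have hc2 : ¬ 2 ≤ ((List.drop mid x).filter (fun f => PySem.Str.endswith f ".msh")).length := by
        intro hc
        rw [ih2, if_pos hc] at heq2
        exact absurd heq2 (by simp)
      rw [ih1, if_neg hc1] at heq1
      rw [ih2, if_neg hc2] at heq2
      obtain ⟨hm1, hn1⟩ := Prod.mk.injEq .. ▸ (Option.some.injEq .. ▸ heq1)
      obtain ⟨hm2, hn2⟩ := Prod.mk.injEq .. ▸ (Option.some.injEq .. ▸ heq2)
      have hsplit : x.filter (fun f => PySem.Str.endswith f ".msh")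
          = (List.take mid x).filter (fun f => PySem.Str.endswith f ".msh")
            ++ (List.drop mid x).filter (fun f => PySem.Str.endswith f ".msh") := by
        conv_lhs => rw [← List.take_append_drop mid x]
        rw [List.filter_append]
      have hsplitn : x.filter (fun f => !PySem.Str.endswith f ".msh")
          = (List.take mid x).filter (fun f => !PySem.Str.endswith f ".msh")
            ++ (List.drop mid x).filter (fun f => !PySem.Str.endswith f ".msh") := by
        conv_lhs => rw [← List.take_append_drop mid x]
        rw [List.filter_append]
      rw [pvScanB.eq_def]
      simp only [if_neg h1, if_neg h2]
      rw [hmid, ih1, ih2, if_neg hc1, if_neg hc2]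
      simp only [hm1, hm2, hn1, hn2]
      rw [if_neg htr]
      simp only [not_le] at hc1 hc2
      rw [hsplit, hsplitn, ← hn1, ← hn2]
      rcases hL : (List.take mid x).filter (fun f => PySem.Str.endswith f ".msh") with _ | ⟨a, as⟩
      · -- no mesh in the left half: the result is the right half's
        have hm1' : m1 = none := by rw [← hm1, hL]; rfl
        rcases hR : (List.drop mid x).filter (fun f => PySem.Str.endswith f ".msh") with _ | ⟨b, bs⟩
        · have hm2' : m2 = none := by rw [← hm2, hR]; rfl
          simp [hm1', hm2', pvTruthy]
        · have hbs : bs = [] := by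
            rw [hR] at hc2; rcases bs with _ | _
            · rfl
            · simp at hc2
          subst hbs
          have hb : b ≠ "" := pv_msh_ne_empty b (by
            have : b ∈ (List.drop mid x).filter (fun f => PySem.Str.endswith f ".msh") := by
              rw [hR]; exact List.mem_singleton_self b
            exact (List.mem_filter.mp this).2)
          have hm2' : m2 = some b := by rw [← hm2, hR]; rfl
          simp [hm1', hm2', pvTruthy]
      · -- the unique mesh is in the left half
        have has : as = [] := by
          rw [hL] at hc1; rcases as with _ | _
          · rfl
          · simp at hc1
        subst has
        have ha : a ≠ "" := pv_msh_ne_empty a (by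
          have : a ∈ (List.take mid x).filter (fun f => PySem.Str.endswith f ".msh") := by
            rw [hL]; exact List.mem_singleton_self a
          exact (List.mem_filter.mp this).2)
        have hm1' : m1 = some a := by rw [← hm1, hL]; rfl
        have hd : (List.drop mid x).filter (fun f => PySem.Str.endswith f ".msh") = [] := by
          rcases hR : (List.drop mid x).filter (fun f => PySem.Str.endswith f ".msh") with _ | ⟨b, bs⟩
          · rfl
          · exfalso
            have hb : b ≠ "" := pv_msh_ne_empty b (by
              have : b ∈ (List.drop mid x).filter (fun f => PySem.Str.endswith f ".msh") := by
                rw [hR]; exact List.mem_cons_self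
              exact (List.mem_filter.mp this).2)
            have hm2' : m2 = some b := by
              rw [← hm2, hR]; simp [List.head?]
            rw [hm1', hm2'] at htr
            simp [pvTruthy, ha, hb] at htr
        rw [hd]
        simp [hm1', pvTruthy, ha]

-- ===== VERDICT (by name: the statement is the Claim_ definition above) =====
theorem handle_ubc_files_list_py_spec : Claim_equal_handle_ubc_files_list_py := by
  intro files _ hpre
  unfold Spec_handle_ubc_files_list_py handle_ubc_files_list_py handle_ubc_files_list_py_alt
  unfold Pre_handle_ubc_files_list_py at hpre
  rw [pvLoopA_none files [], pvScanB_spec files]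
  rcases hx : files.filter (fun f => PySem.Str.endswith f ".msh") with _ | ⟨m, ms⟩
  · rw [hx] at hpre; simp at hpre
  · rw [hx] at hpre
    have hms : ms = [] := by simpa using hpre
    subst hms
    have hm : m ≠ "" := pv_msh_ne_empty m (by
      have : m ∈ files.filter (fun f => PySem.Str.endswith f ".msh") := by
        rw [hx]; exact List.mem_singleton_self m
      exact (List.mem_filter.mp this).2)
    simp [hm, List.head?]
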